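-- pv_equiv track=rewrite | github.com/Kunalbhoir02/INS-Mumbai-University-Practicals | Playflair cipher.py | add_filler_letter
-- ===== SOURCE A (Python) =====
-- def add_filler_letter(text):
--     """Adds 'x' between identical consecutive letters in the text."""
--     new_text = ""
--     i = 0
--     while i < len(text):
--         new_text += text[i]
--         if i + 1 < len(text) and text[i] == text[i + 1]:
--             new_text += 'x'
--         i += 1
--     return new_text
-- ===== SOURCE B (Python) =====
-- def add_filler_letter(text):
--     """Adds 'x' between identical consecutive letters in the text."""
--     parts = []
--     i = 0
--     n = len(text)
--     while i < n:
--         j = i + 1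
--         while j < n and text[j] == text[i]:
--             j += 1
--         parts.append('x'.join(text[i:j]))
--         i = j
--     return ''.join(parts)
-- ===== Notes on version B (the rewrite author's own statement) =====
-- stated objective: faster
-- what changed: Replaced A's character-by-character string accumulator (append each char, then conditionally append the filler) with run-length segmentation: an inner scan finds each maximal run of equal characters, each run is rendered at once by joining it with the filler, and the run segments are concatenated once at the end.
import Mathlib
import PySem

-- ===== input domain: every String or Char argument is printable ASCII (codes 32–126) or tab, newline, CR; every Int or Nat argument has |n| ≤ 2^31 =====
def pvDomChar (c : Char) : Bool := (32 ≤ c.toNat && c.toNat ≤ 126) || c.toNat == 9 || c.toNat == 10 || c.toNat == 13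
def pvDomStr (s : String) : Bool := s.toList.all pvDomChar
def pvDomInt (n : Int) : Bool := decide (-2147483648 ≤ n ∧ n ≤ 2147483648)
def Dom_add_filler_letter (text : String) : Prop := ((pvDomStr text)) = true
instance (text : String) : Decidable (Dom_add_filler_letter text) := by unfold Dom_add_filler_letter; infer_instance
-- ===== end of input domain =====

-- B replaces A's character-by-character accumulator with run-length segmentation:
-- each maximal run of equal characters is found by an inner scan and rendered at
-- once by joining it with the filler; the segments are concatenated once at the end.

-- ===== PORT A =====
-- while loop: i counts up, new_text accumulates; transliterated as index recursion over the char list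
def addFillerA (cs : List Char) (i : Nat) (acc : List Char) : List Char :=
  if h : i < cs.length then
    let acc1 := acc ++ [cs[i]]
    let acc2 := if h2 : i + 1 < cs.length then
        (if cs[i] = cs[i+1] then acc1 ++ ['x'] else acc1)
      else acc1
    addFillerA cs (i+1) acc2
  else acc
termination_by cs.length - i

def add_filler_letter (text : String) : String :=
  String.ofList (addFillerA text.toList 0 [])

-- ===== PORT B =====
-- inner while loop "j = i+1; while j < n and text[j] == text[i]: j += 1":
-- scanB advances j while in range and equal to cs[i] (getElem? = Python's in-range indexing here)
def scanB (cs : List Char) (i j : Nat) : Nat :=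
  if h : j < cs.length ∧ cs[j]? = cs[i]? then scanB cs i (j + 1) else j
termination_by cs.length - j

-- port-side fact scanB needs for the outer loop's termination: the scan never moves left
theorem scanB_ge (cs : List Char) (i : Nat) : ∀ n j, cs.length - j ≤ n → j ≤ scanB cs i j := by
  intro n
  induction n with
  | zero =>
      intro j hn
      rw [scanB]
      split
      · next h => exact absurd h.1 (by omega)
      · exact le_refl j
  | succ n ih =>
      intro j hn
      rw [scanB]
      split
      · next h => exact le_trans (by omega) (ih (j + 1) (by omega))
      · exact le_refl j

-- outer while loop of B: parts accumulates the rendered runs ('x'.join(text[i:j]) =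
-- intersperse 'x' of the slice; text[i:j] with 0 ≤ i ≤ j ≤ n is (drop i).take (j-i))
def loopB (cs : List Char) (i : Nat) (parts : List (List Char)) : List (List Char) :=
  if _h : i < cs.length then
    let j := scanB cs i (i + 1)
    loopB cs j (parts ++ [List.intersperse 'x' ((cs.drop i).take (j - i))])
  else parts
termination_by cs.length - i
decreasing_by
  have := scanB_ge cs i (cs.length - (i + 1)) (i + 1) (le_refl _)
  omega

-- ''.join(parts) = flatten
def add_filler_letter_alt (text : String) : String :=
  String.ofList ((loopB text.toList 0 []).flatten)

-- ===== PRECONDITION & SPEC =====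
def Spec_add_filler_letter (text : String) (out : String) : Prop := out = add_filler_letter_alt text
instance (text : String) (out : String) : Decidable (Spec_add_filler_letter text out) := by unfold Spec_add_filler_letter; infer_instance

-- ===== CLAIM (what is proved, stated in full; the proofs are below) =====
def Claim_equal_add_filler_letter : Prop := ∀ (text : String), Dom_add_filler_letter text → Spec_add_filler_letter text (add_filler_letter text)

-- ===== LEMMAS AND PROOFS =====

-- proof-side helper: the common recursive characterisation both ports reduce to
def fillerRec : List Char → List Char
  | [] => []
  | [c] => [c]
  | c :: d :: rest => c :: (if c = d then ['x'] else []) ++ fillerRec (d :: rest)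

theorem addFillerA_eq (cs : List Char) : ∀ (n i : Nat) (acc : List Char), cs.length - i ≤ n →
    addFillerA cs i acc = acc ++ fillerRec (cs.drop i) := by
  intro n
  induction n with
  | zero =>
      intro i acc hn
      have h : ¬ i < cs.length := by omega
      rw [addFillerA, dif_neg h, List.drop_eq_nil_of_le (by omega), fillerRec, List.append_nil]
  | succ n ih =>
      intro i acc hn
      by_cases h : i < cs.length
      · rw [addFillerA, dif_pos h]
        simp only []
        rw [ih (i+1) _ (by omega)]
        have hdrop : cs.drop i = cs[i] :: cs.drop (i+1) := List.drop_eq_getElem_cons h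
        by_cases h2 : i + 1 < cs.length
        · have hdrop2 : cs.drop (i+1) = cs[i+1] :: cs.drop (i+2) := List.drop_eq_getElem_cons h2
          rw [dif_pos h2, hdrop, hdrop2, fillerRec]
          by_cases he : cs[i] = cs[i+1] <;> simp [he]
        · have hnil : cs.drop (i+1) = [] := List.drop_eq_nil_of_le (by omega)
          rw [dif_neg h2, hdrop, hnil, fillerRec, fillerRec]
          simp
      · rw [addFillerA, dif_neg h, List.drop_eq_nil_of_le (by omega), fillerRec, List.append_nil]

-- full specification of the inner scan
theorem scanB_spec (cs : List Char) (i : Nat) : ∀ n j, cs.length - j ≤ n → j ≤ cs.length →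
    scanB cs i j ≤ cs.length ∧
    (∀ t, j ≤ t → t < scanB cs i j → cs[t]? = cs[i]?) ∧
    (scanB cs i j < cs.length → cs[scanB cs i j]? ≠ cs[i]?) := by
  intro n
  induction n with
  | zero =>
      intro j hn hj
      have h : ¬ (j < cs.length ∧ cs[j]? = cs[i]?) := by
        intro ⟨h1, _⟩; omega
      rw [scanB, dif_neg h]
      refine ⟨hj, fun t ht1 ht2 => absurd ht2 (Nat.not_lt.mpr ht1), fun hlt heq => h ⟨hlt, heq⟩⟩
  | succ n ih =>
      intro j hn hj
      by_cases h : j < cs.length ∧ cs[j]? = cs[i]?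
      · rw [scanB, dif_pos h]
        obtain ⟨hle, hmem, hstop⟩ := ih (j + 1) (by omega) (by omega)
        refine ⟨hle, ?_, hstop⟩
        intro t ht1 ht2
        rcases Nat.eq_or_lt_of_le ht1 with heq | hlt
        · rw [← heq]; exact h.2
        · exact hmem t hlt ht2
      · rw [scanB, dif_neg h]
        refine ⟨hj, fun t ht1 ht2 => absurd ht2 (Nat.not_lt.mpr ht1), fun hlt heq => h ⟨hlt, heq⟩⟩

-- fillerRec on a nonempty run of equal characters followed by a differently-headed rest
theorem fillerRec_run (c : Char) : ∀ (m : Nat) (rest : List Char), rest.head? ≠ some c →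
    fillerRec (List.replicate (m + 1) c ++ rest) =
      List.intersperse 'x' (List.replicate (m + 1) c) ++ fillerRec rest := by
  intro m
  induction m with
  | zero =>
      intro rest hrest
      cases rest with
      | nil => rfl
      | cons d r =>
          have hne : c ≠ d := by
            intro he; exact hrest (by simp [he])
          simp [fillerRec, hne]
  | succ m ih =>
      intro rest hrest
      have : List.replicate (m + 2) c ++ rest = c :: c :: (List.replicate m c ++ rest) := by
        simp [List.replicate_succ]
      rw [this]
      have h2 : (c :: (List.replicate m c ++ rest)) = List.replicate (m + 1) c ++ rest := by
        simp [List.replicate_succ]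
      show c :: (if c = c then ['x'] else []) ++ fillerRec (c :: (List.replicate m c ++ rest)) = _
      rw [h2, ih rest hrest, if_pos rfl]
      have : List.intersperse 'x' (List.replicate (m + 2) c) =
          c :: 'x' :: List.intersperse 'x' (List.replicate (m + 1) c) := by
        simp [List.replicate_succ]
      rw [this]
      simp

theorem loopB_eq (cs : List Char) : ∀ (n i : Nat) (parts : List (List Char)), cs.length - i ≤ n →
    (loopB cs i parts).flatten = parts.flatten ++ fillerRec (cs.drop i) := by
  intro n
  induction n with
  | zero =>
      intro i parts hn
      have h : ¬ i < cs.length := by omega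
      rw [loopB, dif_neg h, List.drop_eq_nil_of_le (by omega), fillerRec, List.append_nil]
  | succ n ih =>
      intro i parts hn
      by_cases h : i < cs.length
      · rw [loopB, dif_pos h]
        simp only []
        set j := scanB cs i (i + 1) with hjdef
        have hge : i + 1 ≤ j := scanB_ge cs i (cs.length - (i + 1)) (i + 1) (le_refl _)
        obtain ⟨hle, hmem, hstop⟩ := scanB_spec cs i (cs.length - (i + 1)) (i + 1) (le_refl _) (by omega)
        have hlen : cs.length - j ≤ n := by omega
        rw [ih j _ hlen]
        -- the slice is a run of cs[i]
        have hrun : (cs.drop i).take (j - i) = List.replicate (j - i) cs[i] := by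
          apply List.ext_getElem
          · simp; omega
          · intro t h1 h2
            simp only [List.getElem_take, List.getElem_drop, List.getElem_replicate]
            have ht : i + t < cs.length := by
              simp at h1; omega
            rcases Nat.eq_zero_or_pos t with ht0 | htpos
            · simp [ht0]
            · have := hmem (i + t) (by omega) (by simp at h1; omega)
              rw [List.getElem?_eq_getElem ht, List.getElem?_eq_getElem h] at this
              exact Option.some.injEq _ _ ▸ (by simpa using this)
        -- split the tail at j
        have hsplit : cs.drop i = List.replicate (j - i) cs[i] ++ cs.drop j := by
          conv_lhs => rw [← List.take_append_drop (j - i) (cs.drop i)]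
          rw [hrun, List.drop_drop]
          have hij : i + (j - i) = j := by omega
          rw [hij]
        have hhead : (cs.drop j).head? ≠ some cs[i] := by
          rw [List.head?_drop]
          by_cases hj : j < cs.length
          · have := hstop hj
            rw [List.getElem?_eq_getElem h] at this
            exact this
          · rw [List.getElem?_eq_none (by omega)]
            simp
        have hm : j - i = (j - i - 1) + 1 := by omega
        rw [hrun, hsplit, hm, fillerRec_run cs[i] (j - i - 1) (cs.drop j) hhead]
        simp
      · rw [loopB, dif_neg h, List.drop_eq_nil_of_le (by omega), fillerRec, List.append_nil]

-- ===== VERDICT (by name: the statement is the Claim_ definition above) =====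
theorem add_filler_letter_spec : Claim_equal_add_filler_letter := by
  intro text _
  unfold Spec_add_filler_letter add_filler_letter add_filler_letter_alt
  rw [addFillerA_eq _ text.toList.length 0 _ (by omega),
    loopB_eq _ text.toList.length 0 _ (by omega)]
  simp
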